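-- pv_equiv track=rewrite | github.com/jinyuanyu/depth_warp_vs | realtime.py | split_offsets_across_devices
-- ===== SOURCE A (Python) =====
-- def split_offsets_across_devices(offsets, num_devices: int):
--     """
--     将offsets按设备连续切分，返回 [(start,end), ...] 与各自的子列表。
--     """
--     N = len(offsets)
--     if num_devices <= 1 or N == 0:
--         return [(0, N)], [offsets]
--     # 近似均分（连续块）
--     base = N // num_devices
--     rem = N % num_devices
--     idx = 0
--     ranges = []
--     subs = []
--     for d in range(num_devices):
--         k = base + (1 if d < rem else 0)
--         s, e = idx, idx + k
--         ranges.append((s, e))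
--         subs.append(offsets[s:e])
--         idx = e
--     return ranges, subs
-- ===== SOURCE B (Python) =====
-- def split_offsets_across_devices(offsets, num_devices: int):
--     """Closed-form boundaries instead of a running accumulator."""
--     N = len(offsets)
--     if num_devices <= 1 or N == 0:
--         return [(0, N)], [offsets]
--     base, rem = divmod(N, num_devices)
--
--     def bnd(d):
--         return d * base + min(d, rem)
--
--     ranges = [(bnd(d), bnd(d + 1)) for d in range(num_devices)]
--     subs = [offsets[s:e] for (s, e) in ranges]
--     return ranges, subs
-- ===== Notes on version B (the rewrite author's own statement) =====
-- stated objective: alternative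
-- what changed: A builds the chunk boundaries with a running accumulator idx updated per device; B computes each boundary independently by the closed form d*base + min(d, rem) and derives ranges and slices from it.
import Mathlib
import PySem

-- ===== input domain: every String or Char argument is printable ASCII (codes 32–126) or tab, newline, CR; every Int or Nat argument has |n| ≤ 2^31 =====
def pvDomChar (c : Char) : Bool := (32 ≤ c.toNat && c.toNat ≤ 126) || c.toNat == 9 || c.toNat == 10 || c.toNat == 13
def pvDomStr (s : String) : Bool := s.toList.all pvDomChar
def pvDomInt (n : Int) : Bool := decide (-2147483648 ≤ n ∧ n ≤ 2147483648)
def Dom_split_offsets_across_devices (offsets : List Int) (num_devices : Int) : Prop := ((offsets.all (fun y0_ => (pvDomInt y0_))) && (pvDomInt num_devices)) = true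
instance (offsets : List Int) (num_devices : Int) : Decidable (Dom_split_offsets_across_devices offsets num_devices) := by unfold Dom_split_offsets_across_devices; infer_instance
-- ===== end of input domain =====

-- B replaces A's running accumulator with closed-form boundaries d*base + min(d, rem); alternative decomposition, same cost.

-- ===== PORT A =====
-- literal transliteration: loop over range(num_devices) with state (idx, ranges, subs)
def split_offsets_across_devices (offsets : List Int) (num_devices : Int) : (List (Int × Int)) × List (List Int) :=
  let N : Int := offsets.length
  if num_devices ≤ 1 ∨ N = 0 then ([(0, N)], [offsets])
  else
    let base := PySem.Int.floordiv N num_devices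
    let rem := PySem.Int.mod N num_devices
    let st := (PySem.List.pyRange 0 num_devices 1).foldl
      (fun (st : Int × List (Int × Int) × List (List Int)) d =>
        let k := base + (if d < rem then (1:Int) else 0)
        let s := st.1
        let e := st.1 + k
        (e, st.2.1 ++ [(s, e)], st.2.2 ++ [PySem.List.slice offsets s e]))
      (0, [], [])
    (st.2.1, st.2.2)

-- ===== PORT B =====
def split_offsets_across_devices_alt (offsets : List Int) (num_devices : Int) : (List (Int × Int)) × List (List Int) :=
  let N : Int := offsets.length
  if num_devices ≤ 1 ∨ N = 0 then ([(0, N)], [offsets])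
  else
    let base := PySem.Int.floordiv N num_devices
    let rem := PySem.Int.mod N num_devices
    let bnd : Int → Int := fun d => d * base + min d rem
    let ranges := (PySem.List.pyRange 0 num_devices 1).map (fun d => (bnd d, bnd (d + 1)))
    let subs := ranges.map (fun se => PySem.List.slice offsets se.1 se.2)
    (ranges, subs)

-- ===== PRECONDITION & SPEC =====
def Spec_split_offsets_across_devices (offsets : List Int) (num_devices : Int) (out : (List (Int × Int)) × List (List Int)) : Prop := out = split_offsets_across_devices_alt offsets num_devices
instance (offsets : List Int) (num_devices : Int) (out : (List (Int × Int)) × List (List Int)) : Decidable (Spec_split_offsets_across_devices offsets num_devices out) := by unfold Spec_split_offsets_across_devices; infer_instance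

-- ===== CLAIM (what is proved, stated in full; the proofs are below) =====
def Claim_equal_split_offsets_across_devices : Prop := ∀ (offsets : List Int) (num_devices : Int), Dom_split_offsets_across_devices offsets num_devices → Spec_split_offsets_across_devices offsets num_devices (split_offsets_across_devices offsets num_devices)

-- ===== LEMMAS AND PROOFS =====

-- A's loop invariant: after d steps idx equals the closed-form boundary and the
-- accumulated lists are the closed-form maps.
theorem loopA_eq (offsets : List Int) (base rem : Int) (hrem : 0 ≤ rem) (n : Nat) :
    (PySem.List.pyRange 0 (n : Int) 1).foldl
      (fun (st : Int × List (Int × Int) × List (List Int)) d =>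
        (st.1 + (base + if d < rem then (1:Int) else 0),
         st.2.1 ++ [(st.1, st.1 + (base + if d < rem then (1:Int) else 0))],
         st.2.2 ++ [PySem.List.slice offsets st.1 (st.1 + (base + if d < rem then (1:Int) else 0))]))
      (0, [], []) =
    ((n : Int) * base + min (n : Int) rem,
     (PySem.List.pyRange 0 (n : Int) 1).map
       (fun d => (d * base + min d rem, (d + 1) * base + min (d + 1) rem)),
     (PySem.List.pyRange 0 (n : Int) 1).map
       (fun d => PySem.List.slice offsets (d * base + min d rem) ((d + 1) * base + min (d + 1) rem))) := by
  induction n with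
  | zero => simp; omega
  | succ m ih =>
    have h : ((m : Int) + 1) = ((m + 1 : Nat) : Int) := by push_cast; ring
    rw [← h, PySem.List.pyRange_one_succ_right (by positivity), List.foldl_append, ih]
    simp only [List.foldl_cons, List.foldl_nil, List.map_append, List.map_cons, List.map_nil,
      Prod.mk.injEq]
    have hb : (m : Int) * base + min (m : Int) rem +
        (base + if (m : Int) < rem then (1:Int) else 0) =
        ((m : Int) + 1) * base + min ((m : Int) + 1) rem := by
      by_cases hm : (m : Int) < rem <;> simp [hm, min_def] <;> split_ifs <;> ring_nf <;> omega
    refine ⟨hb, by rw [hb], by rw [hb]⟩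

-- ===== VERDICT (by name: the statement is the Claim_ definition above) =====
theorem split_offsets_across_devices_spec : Claim_equal_split_offsets_across_devices := by
  intro offsets num_devices _
  unfold Spec_split_offsets_across_devices split_offsets_across_devices split_offsets_across_devices_alt
  dsimp only
  split_ifs with hg
  · rfl
  · push_neg at hg
    have hpos : 0 < num_devices := by omega
    have hrem : 0 ≤ PySem.Int.mod (offsets.length : Int) num_devices := by
      rw [PySem.Int.mod_eq_emod_of_pos hpos]
      exact Int.emod_nonneg _ (by omega)
    have hnd : num_devices = ((num_devices.toNat : Nat) : Int) := by omega
    rw [hnd]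
    rw [hnd] at hrem
    rw [loopA_eq offsets _ _ hrem num_devices.toNat]
    simp [List.map_map, Function.comp]
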